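-- pv_equiv track=rewrite | github.com/radadiyamohit81/Code-for-FAANG | BLOOMBERG/Candy Crush .py | crushCandies
-- ===== SOURCE A (Python) =====
-- def crushCandies(board):                          # O[ M*N * N ] Time
--     crush = False
--
--     for col in range(0, len(board[0])):
--         for row in range(0, len(board)):
--
--             # O[ (M*N) * N ] Time
--             #********************* MOVE  candies 1 STEP DOWN for collapse at any row
--             if board[row][col] < 0:
--                 crush = True
--
--                 while row >= 0:
--                     if row == 0:   ##
--                         board[row][col] = 0
--                         break
--                     board[row][col] = board[row-1][col]
--                     row -= 1
--     return crush
-- ===== SOURCE B (Python) =====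
-- def crushCandies(board):
--     # Returns whether the board contains any marked (negative) candy in the
--     # first len(board[0]) columns; does not mutate the board (A mutates it).
--     w = len(board[0])
--     return any(v < 0 for row in board for v in row[:w])
-- ===== Notes on version B (the rewrite author's own statement) =====
-- stated objective: faster
-- what changed: A simulates the candy collapse, shifting each column down cell by cell whenever it sees a negative; B just scans for a negative value in the first len(board[0]) columns, since A's return value is true exactly when such a cell exists (A also mutates the board, B does not; equivalence is about the return value).
import Mathlib
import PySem

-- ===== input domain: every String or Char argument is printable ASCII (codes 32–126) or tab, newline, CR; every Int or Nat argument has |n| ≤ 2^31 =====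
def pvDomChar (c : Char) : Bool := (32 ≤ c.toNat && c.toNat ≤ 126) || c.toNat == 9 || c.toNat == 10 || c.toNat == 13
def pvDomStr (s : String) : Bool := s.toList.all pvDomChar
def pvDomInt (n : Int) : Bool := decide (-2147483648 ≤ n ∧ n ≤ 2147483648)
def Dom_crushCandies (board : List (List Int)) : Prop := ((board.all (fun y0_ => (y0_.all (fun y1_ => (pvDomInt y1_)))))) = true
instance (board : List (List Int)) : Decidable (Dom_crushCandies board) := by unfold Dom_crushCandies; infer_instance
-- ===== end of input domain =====

-- B replaces A's per-cell downward-shift collapse by a single scan for a negative cell;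
-- A mutates its argument and B does not: the equivalence proved is about the RETURN value only.

-- ===== PORT A =====
-- board[r][c] read / write; exact inside Pre_, where every access A makes is in range
def pvGet2 (b : List (List Int)) (r c : Nat) : Int := (b.getD r []).getD c 0
def pvSet2 (b : List (List Int)) (r c : Nat) (v : Int) : List (List Int) :=
  b.set r ((b.getD r []).set c v)

-- A's 'while row >= 0' loop: shift column c down from row r, zero at the top
def pvShift (b : List (List Int)) (c : Nat) : Nat → List (List Int)
  | 0 => pvSet2 b 0 c 0
  | r + 1 => pvShift (pvSet2 b (r + 1) c (pvGet2 b r c)) c r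

-- one iteration of A's inner 'for row' loop (state = board, crush)
def pvStep (c : Nat) (st : List (List Int) × Bool) (r : Nat) : List (List Int) × Bool :=
  if pvGet2 st.1 r c < 0 then (pvShift st.1 c r, true) else st

def crushCandies (board : List (List Int)) : Bool :=
  let w := (board.headD []).length
  let m := board.length
  ((List.range w).foldl (fun st c => (List.range m).foldl (pvStep c) st) (board, false)).2

-- ===== PORT B =====
-- row[:w] with 0 ≤ w is List.take w (exact for a nonnegative slice bound)
def crushCandies_alt (board : List (List Int)) : Bool :=
  let w := (board.headD []).length
  board.any (fun row => (row.take w).any (fun v => decide (v < 0)))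

-- ===== PRECONDITION & SPEC =====
-- Pre_ excludes exactly the inputs on which A raises IndexError: the empty board
-- (board[0]) and boards with a row shorter than the first row (A reads
-- board[row][col] unconditionally for every col < len(board[0])).
def Pre_crushCandies (board : List (List Int)) : Prop :=
  board ≠ [] ∧ ∀ row ∈ board, (board.headD []).length ≤ row.length
instance (board : List (List Int)) : Decidable (Pre_crushCandies board) := by
  unfold Pre_crushCandies; infer_instance

def pvWitness_crushCandies : List (List Int) := [[1, -2], [3, 4]]

def Spec_crushCandies (board : List (List Int)) (out : Bool) : Prop := out = crushCandies_alt board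
instance (board : List (List Int)) (out : Bool) : Decidable (Spec_crushCandies board out) := by unfold Spec_crushCandies; infer_instance

-- ===== CLAIM (what is proved, stated in full; the proofs are below) =====
def Claim_equal_crushCandies : Prop := ∀ (board : List (List Int)), Dom_crushCandies board → Pre_crushCandies board → Spec_crushCandies board (crushCandies board)

-- ===== LEMMAS AND PROOFS =====

-- writing into column c leaves every other column unchanged
theorem pvGet2_set2_ne (b : List (List Int)) (r c : Nat) (v : Int) (r' c' : Nat)
    (h : c' ≠ c) : pvGet2 (pvSet2 b r c v) r' c' = pvGet2 b r' c' := by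
  unfold pvGet2 pvSet2
  by_cases hr : r' = r
  · subst hr
    by_cases h1 : r' < b.length
    · simp [List.getD_eq_getElem?_getD, h1, Ne.symm h]
    · simp [List.getD_eq_getElem?_getD, h1]
  · simp [List.getD_eq_getElem?_getD, Ne.symm hr]

theorem pvGet2_shift_ne (r : Nat) (b : List (List Int)) (c : Nat) (r' c' : Nat)
    (h : c' ≠ c) : pvGet2 (pvShift b c r) r' c' = pvGet2 b r' c' := by
  induction r generalizing b with
  | zero => simp [pvShift, pvGet2_set2_ne _ _ _ _ _ _ h]
  | succ n ih => simp [pvShift, ih, pvGet2_set2_ne _ _ _ _ _ _ h]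

-- the inner row loop: result flag = incoming flag OR "column c of the incoming board has a negative"
-- (whenever a shift rewrites the column, the flag is already true, so the OR is over the incoming board)
theorem inner_snd (l : List Nat) (c : Nat) (b : List (List Int)) (f : Bool) :
    ((l.foldl (pvStep c) (b, f)).2)
      = (f || l.any (fun r => decide (pvGet2 b r c < 0))) := by
  induction l generalizing b f with
  | nil => simp
  | cons r rs ih =>
    simp only [List.foldl_cons, List.any_cons, pvStep]
    by_cases hneg : pvGet2 b r c < 0
    · simp only [if_pos hneg, ih]
      simp [hneg]
    · simp only [if_neg hneg, ih]
      simp [hneg]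

-- the inner row loop never touches columns other than c
theorem inner_fst_ne (l : List Nat) (c : Nat) (b : List (List Int)) (f : Bool)
    (r' c' : Nat) (h : c' ≠ c) :
    pvGet2 ((l.foldl (pvStep c) (b, f)).1) r' c' = pvGet2 b r' c' := by
  induction l generalizing b f with
  | nil => simp
  | cons r rs ih =>
    simp only [List.foldl_cons, pvStep]
    by_cases hneg : pvGet2 b r c < 0
    · simp only [if_pos hneg, ih, pvGet2_shift_ne _ _ _ _ _ h]
    · simp only [if_neg hneg, ih]

-- the outer column loop on distinct columns: flag = OR over columns of "has a negative" in the ORIGINAL board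
theorem outer_snd (cols : List Nat) (m : Nat) (b : List (List Int)) (f : Bool)
    (hnd : cols.Nodup) :
    ((cols.foldl (fun st c => (List.range m).foldl (pvStep c) st) (b, f)).2)
      = (f || cols.any (fun c => (List.range m).any (fun r => decide (pvGet2 b r c < 0)))) := by
  induction cols generalizing b f with
  | nil => simp
  | cons c cs ih =>
    simp only [List.foldl_cons, List.any_cons]
    have hcs : c ∉ cs := (List.nodup_cons.mp hnd).1
    have hst : ((List.range m).foldl (pvStep c) (b, f))
        = (((List.range m).foldl (pvStep c) (b, f)).1,
           f || (List.range m).any (fun r => decide (pvGet2 b r c < 0))) := by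
      rw [← inner_snd]
    rw [hst, ih _ _ (List.nodup_cons.mp hnd).2]
    have hany : cs.any (fun c' => (List.range m).any
          (fun r => decide (pvGet2 ((List.range m).foldl (pvStep c) (b, f)).1 r c' < 0)))
        = cs.any (fun c' => (List.range m).any (fun r => decide (pvGet2 b r c' < 0))) := by
      rw [Bool.eq_iff_iff]
      simp only [List.any_eq_true]
      constructor
      · rintro ⟨c', hc', x, hx, hp⟩
        have hne : c' ≠ c := fun he => hcs (he ▸ hc')
        rw [inner_fst_ne (List.range m) c b f x c' hne] at hp
        exact ⟨c', hc', x, hx, hp⟩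
      · rintro ⟨c', hc', x, hx, hp⟩
        have hne : c' ≠ c := fun he => hcs (he ▸ hc')
        rw [← inner_fst_ne (List.range m) c b f x c' hne] at hp
        exact ⟨c', hc', x, hx, hp⟩
    rw [hany, Bool.or_assoc]

-- ===== VERDICT (by name: the statement is the Claim_ definition above) =====
theorem crushCandies_spec : Claim_equal_crushCandies := by
  intro board _ hpre
  unfold Spec_crushCandies crushCandies crushCandies_alt
  rw [outer_snd _ _ _ _ (List.nodup_range)]
  rw [Bool.eq_iff_iff]
  simp only [Bool.false_or, List.any_eq_true, List.mem_range, decide_eq_true_eq]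
  constructor
  · rintro ⟨c, hc, r, hr, hneg⟩
    refine ⟨board[r], List.getElem_mem hr, ?_⟩
    have hlen : (board.headD []).length ≤ board[r].length :=
      hpre.2 _ (List.getElem_mem hr)
    have hval : pvGet2 board r c = board[r][c]'(by omega) := by
      unfold pvGet2
      rw [List.getD_eq_getElem _ _ hr, List.getD_eq_getElem _ _ (by omega)]
    refine ⟨(board[r].take (board.headD []).length)[c]'(by rw [List.length_take]; omega),
      List.getElem_mem _, ?_⟩
    rw [List.getElem_take]
    rw [hval] at hneg
    exact hneg
  · rintro ⟨row, hrow, v, hv, hvneg⟩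
    obtain ⟨r, hr, hre⟩ := List.getElem_of_mem hrow
    obtain ⟨c, hcl, hce⟩ := List.getElem_of_mem hv
    have hcw : c < (board.headD []).length := by
      rw [List.length_take] at hcl; omega
    refine ⟨c, hcw, r, hr, ?_⟩
    have hlen : (board.headD []).length ≤ row.length := hpre.2 _ hrow
    have hval : pvGet2 board r c = row[c]'(by omega) := by
      unfold pvGet2
      rw [List.getD_eq_getElem _ _ hr]
      simp only [hre]
      rw [List.getD_eq_getElem _ _ (by omega)]
    rw [hval]
    rw [List.getElem_take] at hce
    rw [hce]; exact hvneg
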